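-- pv_equiv track=rewrite | github.com/epoyraz/leetcode | solutions/1906.py | maxScore
-- ===== SOURCE A (Python) =====
-- def maxScore(nums):
--     n = len(nums)
--     memo = {}
--
--     def gcd(a, b):
--         while b:
--             a, b = b, a % b
--         return a
--
--     def dp(mask):
--         if mask == (1 << n) - 1:
--             return 0
--         if mask in memo:
--             return memo[mask]
--
--         max_score = 0
--         turn = bin(mask).count('1') // 2 + 1
--
--         for i in range(n):
--             if not (mask & (1 << i)):
--                 for j in range(i + 1, n):
--                     if not (mask & (1 << j)):
--                         new_mask = mask | (1 << i) | (1 << j)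
--                         score = turn * gcd(nums[i], nums[j]) + dp(new_mask)
--                         max_score = max(max_score, score)
--
--         memo[mask] = max_score
--         return max_score
--
--     return dp(0)
-- ===== SOURCE B (Python) =====
-- def maxScore(nums):
--     # Bottom-up tabulation over masks (largest mask first) instead of A's
--     # top-down memoized recursion; same gcd helper, same candidate pairs.
--     def gcd(a, b):
--         while b:
--             a, b = b, a % b
--         return a
--
--     n = len(nums)
--     full = (1 << n) - 1
--     dp = [0] * (full + 1)          # dp[full] stays 0 (base case)
--     mask = full - 1
--     while mask >= 0:
--         turn = bin(mask).count('1') // 2 + 1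
--         cands = [0] + [turn * gcd(nums[i], nums[j]) + dp[mask | (1 << i) | (1 << j)]
--                        for i in range(n) if not mask & (1 << i)
--                        for j in range(i + 1, n) if not mask & (1 << j)]
--         dp[mask] = max(cands)
--         mask -= 1
--     return dp[0]
-- ===== Notes on version B (the rewrite author's own statement) =====
-- stated objective: alternative
-- what changed: Replaced the top-down memoized recursion over masks by an iterative bottom-up table: dp over all 2^n masks filled from the full mask downwards, so the recursion and the memo dictionary disappear.
import Mathlib
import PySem

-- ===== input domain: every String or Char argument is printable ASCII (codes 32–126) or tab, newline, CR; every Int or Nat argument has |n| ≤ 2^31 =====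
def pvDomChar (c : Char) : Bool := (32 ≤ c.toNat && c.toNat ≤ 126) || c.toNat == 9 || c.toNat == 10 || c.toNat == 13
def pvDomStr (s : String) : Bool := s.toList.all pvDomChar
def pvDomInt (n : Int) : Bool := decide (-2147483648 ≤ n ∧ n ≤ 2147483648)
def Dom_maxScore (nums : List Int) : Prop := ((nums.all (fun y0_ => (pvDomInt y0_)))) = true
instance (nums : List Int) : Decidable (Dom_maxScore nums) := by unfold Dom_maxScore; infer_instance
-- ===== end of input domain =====

-- B replaces A's top-down memoized recursion over masks by a bottom-up table
-- filled from the full mask downwards (objective: alternative decomposition).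

-- ===== PORT A =====
-- gcd helper, identical in both Pythons ('while b: a, b = b, a % b'; Python '%' = PySem.Int.mod)
def pyGcd (a b : Int) : Int :=
  if _hb0 : b = 0 then a else pyGcd b (PySem.Int.mod a b)
termination_by b.natAbs
decreasing_by
  rcases lt_trichotomy b 0 with hb | hb | hb
  · have := PySem.Int.mod_neg_bounds a hb
    omega
  · exact absurd hb _hb0
  · have h1 := PySem.Int.mod_nonneg a hb
    have h2 := PySem.Int.mod_lt a hb
    omega

-- the (i, j) pairs A's nested 'for i … for j …' loops visit, in order
def pairsA (n : Nat) (mask : Nat) : List (Nat × Nat) :=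
  (List.range n).flatMap fun i =>
    if mask.testBit i then []
    else (List.range' (i+1) (n - (i+1))).filterMap fun j =>
      if mask.testBit j then none else some (i, j)

theorem mem_pairsA {n mask : Nat} {i j : Nat} (h : (i, j) ∈ pairsA n mask) :
    i < n ∧ j < n ∧ mask.testBit i = false ∧ mask.testBit j = false := by
  simp only [pairsA, List.mem_flatMap, List.mem_range] at h
  obtain ⟨i', hi', hmem⟩ := h
  cases hb : mask.testBit i' with
  | true => rw [hb] at hmem; simp at hmem
  | false =>
    rw [hb] at hmem
    simp only [Bool.false_eq_true, if_false, List.mem_filterMap, List.mem_range'] at hmem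
    obtain ⟨j', hj', hv⟩ := hmem
    cases hbj : mask.testBit j' with
    | true => rw [hbj] at hv; simp at hv
    | false =>
      rw [hbj] at hv
      simp only [Bool.false_eq_true, if_false, Option.some.injEq, Prod.mk.injEq] at hv
      obtain ⟨rfl, rfl⟩ := hv
      exact ⟨hi', by omega, hb, hbj⟩

theorem card_free_lt {n mask : Nat} {i j : Nat} (hi : i < n)
    (hbi : mask.testBit i = false) :
    ((Finset.range n).filter fun k => (mask ||| 2^i ||| 2^j).testBit k = false).card
      < ((Finset.range n).filter fun k => mask.testBit k = false).card := by
  apply Finset.card_lt_card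
  rw [Finset.ssubset_iff_of_subset]
  · refine ⟨i, ?_, ?_⟩
    · simp [Finset.mem_filter, hi, hbi]
    · simp [Finset.mem_filter, Nat.testBit_or, Nat.testBit_two_pow_self]
  · intro k hk
    simp only [Finset.mem_filter, Nat.testBit_or, Bool.or_eq_false_iff] at hk ⊢
    exact ⟨hk.1, hk.2.1.1⟩

-- A's dp(mask); the memo dictionary only caches values and is dropped; the
-- running max of the nested loops is the foldl max over the visited pairs;
-- nums[i] with 0 ≤ i < len(nums) is exactly nums.getD i 0
def dpA (nums : List Int) (n : Nat) (mask : Nat) : Int :=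
  if mask = 2^n - 1 then 0
  else
    let turn : Nat := PySem.Int.bitCount (mask : Int) / 2 + 1  -- bin(mask).count('1') // 2 + 1
    (pairsA n mask).attach.foldl
      (fun acc p =>
        max acc ((turn : Int) * pyGcd (nums.getD p.1.1 0) (nums.getD p.1.2 0)
                 + dpA nums n (mask ||| 2^p.1.1 ||| 2^p.1.2))) 0
termination_by ((Finset.range n).filter fun k => mask.testBit k = false).card
decreasing_by
  obtain ⟨hi, _, hbi, _⟩ := mem_pairsA p.2
  exact card_free_lt hi hbi

def maxScore (nums : List Int) : Int := dpA nums nums.length 0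

-- ===== PORT B =====
-- the candidate list  [0] + [turn*gcd(...) + dp[mask|1<<i|1<<j]  for i … for j …]
def candsB (nums : List Int) (n : Nat) (dp : List Int) (mask : Nat) : List Int :=
  let turn : Nat := PySem.Int.bitCount (mask : Int) / 2 + 1
  0 :: ((List.range n).flatMap fun i =>
    if mask.testBit i then []
    else (List.range' (i+1) (n - (i+1))).filterMap fun j =>
      if mask.testBit j then none
      else some ((turn : Int) * pyGcd (nums.getD i 0) (nums.getD j 0)
                 + dp.getD (mask ||| 2^i ||| 2^j) 0))

-- 'mask = full-1; while mask >= 0: dp[mask] = max(cands); mask -= 1':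
-- loopB … dp m processes masks m-1, m-2, …, 0
def loopB (nums : List Int) (n : Nat) (dp : List Int) : Nat → List Int
  | 0 => dp
  | m + 1 =>
      loopB nums n
        (dp.set m ((PySem.List.max? (candsB nums n dp m) (fun y => y)).getD 0)) m

def maxScore_alt (nums : List Int) : Int :=
  let n := nums.length
  let full := 2^n - 1
  (loopB nums n (List.replicate (full + 1) 0) full).getD 0 0

-- ===== PRECONDITION & SPEC =====
def Spec_maxScore (nums : List Int) (out : Int) : Prop := out = maxScore_alt nums
instance (nums : List Int) (out : Int) : Decidable (Spec_maxScore nums out) := by unfold Spec_maxScore; infer_instance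

-- ===== CLAIM (what is proved, stated in full; the proofs are below) =====
def Claim_equal_maxScore : Prop := ∀ (nums : List Int), Dom_maxScore nums → Spec_maxScore nums (maxScore nums)

-- ===== LEMMAS AND PROOFS =====

theorem dpA_full (nums : List Int) (n : Nat) : dpA nums n (2^n - 1) = 0 := by
  rw [dpA]; simp

-- the candidate values B reads from the table equal A's recursive values,
-- provided every entry above `mask` is already correct
theorem candsB_eq (nums : List Int) (n : Nat) (dp : List Int) (mask : Nat)
    (hmask : mask < 2^n)
    (hdp : ∀ k, mask < k → k ≤ 2^n - 1 → dp.getD k 0 = dpA nums n k) :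
    candsB nums n dp mask =
      0 :: (pairsA n mask).map
        (fun p => ((PySem.Int.bitCount (mask : Int) / 2 + 1 : Nat) : Int)
                    * pyGcd (nums.getD p.1 0) (nums.getD p.2 0)
                  + dpA nums n (mask ||| 2^p.1 ||| 2^p.2)) := by
  unfold candsB pairsA
  simp only [List.map_flatMap]
  refine congrArg _ (List.flatMap_congr fun i hi => ?_)
  rw [List.mem_range] at hi
  cases hb : mask.testBit i with
  | true => simp
  | false =>
    simp only [Bool.false_eq_true, if_false, List.map_filterMap]
    refine List.filterMap_congr fun j hj => ?_
    rw [List.mem_range'] at hj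
    cases hbj : mask.testBit j with
    | true => simp
    | false =>
      simp only [Bool.false_eq_true, if_false, Option.map_some]
      have hnm_le : mask ||| 2^i ||| 2^j ≤ 2^n - 1 := by
        have h2i : 2^i < 2^n := Nat.pow_lt_pow_right (by norm_num) hi
        have h2j : 2^j < 2^n := Nat.pow_lt_pow_right (by norm_num) (by omega)
        have := Nat.or_lt_two_pow (Nat.or_lt_two_pow hmask h2i) h2j
        omega
      have hnm_gt : mask < mask ||| 2^i ||| 2^j := by
        have h1 : mask ≤ mask ||| 2^i ||| 2^j :=
          le_trans (Nat.left_le_or) (Nat.left_le_or)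
        rcases Nat.lt_or_ge mask (mask ||| 2^i ||| 2^j) with h2 | h2
        · exact h2
        · exfalso
          have heq : mask = mask ||| 2^i ||| 2^j := le_antisymm h1 h2
          have := congrArg (fun x => x.testBit i) heq
          simp [Nat.testBit_or, hb, Nat.testBit_two_pow_self] at this
      rw [hdp _ hnm_gt hnm_le]

-- one table update computes A's value at `mask`
theorem step_eq (nums : List Int) (n : Nat) (dp : List Int) (mask : Nat)
    (hmask : mask < 2^n) (hne : mask ≠ 2^n - 1)
    (hdp : ∀ k, mask < k → k ≤ 2^n - 1 → dp.getD k 0 = dpA nums n k) :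
    (PySem.List.max? (candsB nums n dp mask) (fun y => y)).getD 0 = dpA nums n mask := by
  rw [candsB_eq nums n dp mask hmask hdp, PySem.List.max?_id_cons]
  conv_rhs => rw [dpA]
  simp only [hne, if_false, Option.getD_some]
  rw [List.foldl_map]
  exact (List.foldl_attach
    (l := pairsA n mask)
    (f := fun (acc : Int) (y : Nat × Nat) =>
      max acc (((PySem.Int.bitCount (mask : Int) / 2 + 1 : Nat) : Int)
                 * pyGcd (nums.getD y.1 0) (nums.getD y.2 0)
               + dpA nums n (mask ||| 2^y.1 ||| 2^y.2)))
    (b := 0)).symm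

theorem loopB_inv (nums : List Int) (n : Nat) :
    ∀ (m : Nat) (dp : List Int), m ≤ 2^n - 1 → dp.length = 2^n →
      (∀ k, m ≤ k → k ≤ 2^n - 1 → dp.getD k 0 = dpA nums n k) →
      ∀ k, k ≤ 2^n - 1 → (loopB nums n dp m).getD k 0 = dpA nums n k := by
  intro m
  induction m with
  | zero =>
      intro dp _ _ hdp k hk
      exact hdp k (Nat.zero_le k) hk
  | succ m ih =>
      intro dp hm hlen hdp k hk
      have hpos : 0 < 2^n := Nat.two_pow_pos n
      have hmlt : m < 2^n := by omega
      have hmne : m ≠ 2^n - 1 := by omega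
      rw [loopB]
      apply ih
      · omega
      · simpa using hlen
      · intro k' hk1 hk2
        by_cases hkm : k' = m
        · subst hkm
          have hv := step_eq nums n dp k' hmlt hmne (fun k h1 h2 => hdp k (by omega) h2)
          simp only [List.getD, List.getElem?_set_self (by omega : k' < dp.length),
            Option.getD_some]
          exact hv
        · rw [show (dp.set m _).getD k' 0 = dp.getD k' 0 by
            simp [List.getD, List.getElem?_set_ne (by omega : m ≠ k')]]
          exact hdp k' (by omega) hk2
      · exact hk

-- ===== VERDICT (by name: the statement is the Claim_ definition above) =====
theorem maxScore_spec : Claim_equal_maxScore := by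
  intro nums _
  unfold Spec_maxScore maxScore maxScore_alt
  have hpos : 0 < 2^nums.length := Nat.two_pow_pos _
  have hinit : ∀ k, 2^nums.length - 1 ≤ k → k ≤ 2^nums.length - 1 →
      (List.replicate (2^nums.length - 1 + 1) (0 : Int)).getD k 0 = dpA nums nums.length k := by
    intro k h1 h2
    have hk : k = 2^nums.length - 1 := le_antisymm h2 h1
    subst hk
    rw [dpA_full]
    simp [List.getD]
  exact (loopB_inv nums nums.length (2^nums.length - 1) _ le_rfl
    (by simp; omega) hinit 0 (Nat.zero_le _)).symm
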